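-- pv_equiv track=rewrite | github.com/nrwrn/aoc-py | aoc/days/day14.py | hist_add
-- ===== SOURCE A (Python) =====
-- from typing import Dict, Iterable, List, Optional, Set, Tuple
--
-- def hist_add(a: Dict[str, int], b: Dict[str, int]) -> Dict[str, int]:
--     c = {}
--     for k, v in a.items():
--         if k not in c:
--             c[k] = 0
--         c[k] += v
--     for k, v in b.items():
--         if k not in c:
--             c[k] = 0
--         c[k] += v
--     return c
-- ===== SOURCE B (Python) =====
-- def hist_add(a, b):
--     # One pass over the merged key set (a's keys in order, then b's new keys),
--     # looking each key up in both inputs, instead of two accumulation loops.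
--     merged = {**a, **b}
--     return {k: a.get(k, 0) + b.get(k, 0) for k in merged}
-- ===== Notes on version B (the rewrite author's own statement) =====
-- stated objective: simpler
-- what changed: Replaces A's two sequential in-place accumulation loops with building the merged key order once ({**a, **b}) and a single dict comprehension that looks each key up in both inputs with get(k, 0).
import Mathlib
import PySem

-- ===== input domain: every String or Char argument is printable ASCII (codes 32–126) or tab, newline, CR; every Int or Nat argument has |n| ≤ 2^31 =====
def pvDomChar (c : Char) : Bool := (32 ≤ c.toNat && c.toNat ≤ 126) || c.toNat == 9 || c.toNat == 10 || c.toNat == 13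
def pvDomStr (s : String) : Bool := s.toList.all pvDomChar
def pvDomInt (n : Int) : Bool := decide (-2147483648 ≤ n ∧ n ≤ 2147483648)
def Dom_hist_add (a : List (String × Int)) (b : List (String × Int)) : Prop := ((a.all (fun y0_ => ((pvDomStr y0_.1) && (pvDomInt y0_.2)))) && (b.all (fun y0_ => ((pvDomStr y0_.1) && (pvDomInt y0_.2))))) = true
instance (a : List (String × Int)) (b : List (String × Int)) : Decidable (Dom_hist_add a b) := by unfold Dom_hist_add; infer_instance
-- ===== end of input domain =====

-- B replaces A's two in-place accumulation loops by one pass over the merged key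
-- order {**a, **b} with get-lookups in both inputs (objective: simpler).


-- ===== PORT A =====
-- loop body of both of A's 'for k, v in …' loops: if k not in c: c[k] = 0; c[k] += v
def histStep (c : PySem.Dict String Int) (p : String × Int) : PySem.Dict String Int :=
  let c := if c.contains p.1 then c else c.insert p.1 0
  c.modify p.1 0 (· + p.2)

def hist_add (a : List (String × Int)) (b : List (String × Int)) : List (String × Int) :=
  let c : PySem.Dict String Int := PySem.Dict.empty
  let c := a.foldl histStep c
  let c := b.foldl histStep c
  c.items

-- ===== PORT B =====
def hist_add_alt (a : List (String × Int)) (b : List (String × Int)) : List (String × Int) :=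
  let da := PySem.Dict.ofList a
  let db := PySem.Dict.ofList b
  let merged := da.update b            -- {**a, **b}
  merged.keys.map (fun k => (k, da.getD k 0 + db.getD k 0))

-- ===== PRECONDITION & SPEC =====
-- The Python arguments are dicts, whose keys are necessarily distinct; Pre_ excludes only
-- association lists with duplicate keys, which do not represent any Python dict input.
def Pre_hist_add (a : List (String × Int)) (b : List (String × Int)) : Prop :=
  (a.map Prod.fst).Nodup ∧ (b.map Prod.fst).Nodup
instance (a : List (String × Int)) (b : List (String × Int)) : Decidable (Pre_hist_add a b) := by unfold Pre_hist_add; infer_instance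

def pvWitness_hist_add : (List (String × Int)) × (List (String × Int)) :=
  ([("a", 1), ("b", 2)], [("b", 3), ("c", -4)])

def Spec_hist_add (a : List (String × Int)) (b : List (String × Int)) (out : List (String × Int)) : Prop := out = hist_add_alt a b
instance (a : List (String × Int)) (b : List (String × Int)) (out : List (String × Int)) : Decidable (Spec_hist_add a b out) := by unfold Spec_hist_add; infer_instance

-- ===== CLAIM (what is proved, stated in full; the proofs are below) =====
def Claim_equal_hist_add : Prop := ∀ (a : List (String × Int)) (b : List (String × Int)), Dom_hist_add a b → Pre_hist_add a b → Spec_hist_add a b (hist_add a b)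

-- ===== LEMMAS AND PROOFS =====

-- first-match lookup in an association list, default 0
def lkp : List (String × Int) → String → Int
  | [], _ => 0
  | (k, v) :: t, x => if x = k then v else lkp t x

theorem lkp_eq_zero_of_not_mem (l : List (String × Int)) (x : String)
    (h : x ∉ l.map Prod.fst) : lkp l x = 0 := by
  induction l with
  | nil => rfl
  | cons p t ih =>
    obtain ⟨k, v⟩ := p
    simp only [List.map_cons, List.mem_cons] at h
    push Not at h
    simp only [lkp, if_neg h.1]
    exact ih h.2

theorem histStep_getD (c : PySem.Dict String Int) (k x : String) (v : Int) :
    (histStep c (k, v)).getD x 0 = if x = k then c.getD k 0 + v else c.getD x 0 := by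
  unfold histStep
  by_cases h : c.contains k
  · simp only [h, if_true, PySem.Dict.getD_modify]
  · simp only [Bool.not_eq_true] at h
    simp only [h, Bool.false_eq_true, if_false, PySem.Dict.getD_modify, PySem.Dict.getD_insert,
      PySem.Dict.getD_of_not_contains c 0 h]
    by_cases hx : x = k
    · simp [hx]
    · simp [hx]

theorem histStep_keys (c : PySem.Dict String Int) (k : String) (v : Int) :
    (histStep c (k, v)).keys = PySem.Set.add c.keys k := by
  unfold histStep
  by_cases h : c.contains k
  · rw [if_pos h, PySem.Dict.keys_modify, PySem.Dict.keys_insert_of_contains _ _ h,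
      PySem.Set.add, PySem.Set.contains_eq_listContains]
    have : k ∈ c.keys := (PySem.Dict.contains_iff_mem_keys c k).mp h
    simp [this]
  · simp only [Bool.not_eq_true] at h
    rw [if_neg (by simp [h]), PySem.Dict.keys_modify,
      PySem.Dict.keys_insert_of_contains _ _ (by simp),
      PySem.Dict.keys_insert_of_not_contains _ _ h,
      PySem.Set.add, PySem.Set.contains_eq_listContains]
    have : k ∉ c.keys := fun hm => by
      simp [(PySem.Dict.contains_iff_mem_keys c k).mpr hm] at h
    simp [this]

theorem loop_getD (l : List (String × Int)) (c : PySem.Dict String Int) (x : String)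
    (hl : (l.map Prod.fst).Nodup) :
    (l.foldl histStep c).getD x 0 = c.getD x 0 + lkp l x := by
  induction l generalizing c with
  | nil => simp [lkp]
  | cons p t ih =>
    obtain ⟨k, v⟩ := p
    simp only [List.map_cons, List.nodup_cons] at hl
    simp only [List.foldl_cons, ih _ hl.2, histStep_getD, lkp]
    by_cases hx : x = k
    · subst hx
      rw [if_pos rfl, if_pos rfl, lkp_eq_zero_of_not_mem t x hl.1]
      ring
    · rw [if_neg hx, if_neg hx]

theorem loop_keys (l : List (String × Int)) (c : PySem.Dict String Int) :
    (l.foldl histStep c).keys = PySem.Set.update c.keys (l.map Prod.fst) := by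
  induction l generalizing c with
  | nil => simp [PySem.Set.update]
  | cons p t ih =>
    obtain ⟨k, v⟩ := p
    simp only [List.foldl_cons, List.map_cons, PySem.Set.update_cons, ih, histStep_keys]

theorem ofList_getD (l : List (String × Int)) (x : String)
    (hl : (l.map Prod.fst).Nodup) :
    (PySem.Dict.ofList l).getD x 0 = lkp l x := by
  have key : ∀ (l : List (String × Int)) (d : PySem.Dict String Int),
      (l.map Prod.fst).Nodup →
      (l.foldl (fun acc p => acc.insert p.1 p.2) d).getD x 0 =
        if x ∈ l.map Prod.fst then lkp l x else d.getD x 0 := by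
    intro l
    induction l with
    | nil => intro d _; simp only [List.map_nil, List.foldl_nil, List.not_mem_nil, if_false]
    | cons p t ih =>
      intro d hnd
      obtain ⟨k, v⟩ := p
      simp only [List.map_cons, List.nodup_cons] at hnd
      simp only [List.foldl_cons, ih _ hnd.2, lkp, List.map_cons, List.mem_cons]
      by_cases hx : x = k
      · subst hx
        simp [hnd.1]
      · by_cases hm : x ∈ t.map Prod.fst <;>
          simp [hx, hm, PySem.Dict.getD_insert]
  rw [PySem.Dict.ofList, PySem.Dict.update, key l PySem.Dict.empty hl]
  by_cases hm : x ∈ l.map Prod.fst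
  · rw [if_pos hm]
  · rw [if_neg hm, lkp_eq_zero_of_not_mem l x hm, PySem.Dict.getD_empty]

theorem ofList_keys (l : List (String × Int)) :
    (PySem.Dict.ofList l).keys = PySem.Set.ofList (l.map Prod.fst) := by
  rw [PySem.Dict.ofList, PySem.Dict.update,
    PySem.Dict.keys_foldl_insert_key l Prod.fst (fun _ p => p.2) PySem.Dict.empty,
    PySem.Dict.keys_empty, PySem.Set.update_nil_left]

theorem update_keys (d : PySem.Dict String Int) (l : List (String × Int)) :
    (d.update l).keys = PySem.Set.update d.keys (l.map Prod.fst) := by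
  rw [PySem.Dict.update, PySem.Dict.keys_foldl_insert_key l Prod.fst (fun _ p => p.2) d]

-- ===== VERDICT (by name: the statement is the Claim_ definition above) =====
theorem hist_add_spec : Claim_equal_hist_add := by
  intro a b _ hpre
  obtain ⟨ha, hb⟩ := hpre
  show (b.foldl histStep (a.foldl histStep PySem.Dict.empty)).items
      = ((PySem.Dict.ofList a).update b).keys.map
          (fun k => (k, (PySem.Dict.ofList a).getD k 0 + (PySem.Dict.ofList b).getD k 0))
  have hkeysA : (b.foldl histStep (a.foldl histStep PySem.Dict.empty)
      |>.keys) = PySem.Set.update (PySem.Set.ofList (a.map Prod.fst)) (b.map Prod.fst) := by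
    rw [loop_keys, loop_keys, PySem.Dict.keys_empty, PySem.Set.update_nil_left]
  have hkeysB : ((PySem.Dict.ofList a).update b).keys
      = PySem.Set.update (PySem.Set.ofList (a.map Prod.fst)) (b.map Prod.fst) := by
    rw [update_keys, ofList_keys]
  have hnodup : (b.foldl histStep (a.foldl histStep PySem.Dict.empty)).keys.Nodup := by
    rw [hkeysA]
    exact PySem.Set.nodup_update _ _ (PySem.Set.nodup_ofList _)
  rw [PySem.Dict.items_eq_map_keys _ hnodup 0, hkeysA, ← hkeysB]
  apply List.map_congr_left
  intro k _
  have : (b.foldl histStep (a.foldl histStep PySem.Dict.empty)).getD k 0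
      = lkp a k + lkp b k := by
    rw [loop_getD b _ k hb, loop_getD a _ k ha, PySem.Dict.getD_empty]
    ring
  rw [this, ofList_getD a k ha, ofList_getD b k hb]
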